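-- pv_equiv track=rewrite | github.com/kokx/aoc | 2018/15/part-one-faster.py | get_best_enemy
-- ===== SOURCE A (Python) =====
-- def get_best_enemy(locations, values):
--     lowest = 9999999999
--     lowestLocs = []
--     for loc in locations:
--         if values[loc] < lowest:
--             lowest = values[loc]
--             lowestLocs = [loc]
--         elif values[loc] == lowest:
--             lowestLocs.append(loc)
--     if len(lowestLocs) > 0:
--         return sorted(lowestLocs)[0]
--     return None
-- ===== SOURCE B (Python) =====
-- def get_best_enemy(locations, values):
--     if not locations:
--         return None
--     m = min(values[loc] for loc in locations)
--     return min(loc for loc in locations if values[loc] == m)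
-- ===== Notes on version B (the rewrite author's own statement) =====
-- stated objective: simpler
-- what changed: Replaces A's single accumulator loop (running minimum plus a tie-list that is sorted at the end) by two plain scans: min of the values, then min of the locations attaining it; the tie-list and the sort disappear.
import Mathlib
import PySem

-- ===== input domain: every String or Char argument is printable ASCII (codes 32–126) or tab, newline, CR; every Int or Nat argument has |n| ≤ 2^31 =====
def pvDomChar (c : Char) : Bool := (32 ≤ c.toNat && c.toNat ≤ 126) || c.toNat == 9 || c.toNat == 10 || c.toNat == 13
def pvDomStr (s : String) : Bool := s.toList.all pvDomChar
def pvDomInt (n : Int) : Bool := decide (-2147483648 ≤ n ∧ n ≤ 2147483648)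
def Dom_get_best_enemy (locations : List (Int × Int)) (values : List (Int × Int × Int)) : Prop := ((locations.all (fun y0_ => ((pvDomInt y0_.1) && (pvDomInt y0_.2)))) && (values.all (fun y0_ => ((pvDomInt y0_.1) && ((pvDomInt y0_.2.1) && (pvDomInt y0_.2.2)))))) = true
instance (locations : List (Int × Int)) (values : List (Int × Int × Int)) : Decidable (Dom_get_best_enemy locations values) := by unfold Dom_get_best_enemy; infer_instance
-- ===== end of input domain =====

-- B replaces A's single accumulating loop (running minimum + tie-list sorted at the end) by two
-- plain scans: the minimum value, then the smallest location attaining it (objective: simpler).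

-- ===== PORT A =====
-- values[loc]: dict lookup, first matching key; the default 0 is only reachable outside
-- Pre_get_best_enemy (in Python a missing key is a KeyError, which Pre_ excludes).
def pvLookup (values : List (Int × Int × Int)) (loc : Int × Int) : Int :=
  match values with
  | [] => 0
  | e :: rest => if e.1 = loc.1 ∧ e.2.1 = loc.2 then e.2.2 else pvLookup rest loc

-- the for-loop of A over (lowest, lowestLocs)
def goA (v : Int × Int → Int) : List (Int × Int) → Int → List (Int × Int) → Int × List (Int × Int)
  | [], lowest, locs => (lowest, locs)
  | loc :: rest, lowest, locs =>
    if v loc < lowest then goA v rest (v loc) [loc]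
    else if v loc = lowest then goA v rest lowest (locs ++ [loc])
    else goA v rest lowest locs

def get_best_enemy (locations : List (Int × Int)) (values : List (Int × Int × Int)) : Option (Int × Int) :=
  let st := goA (fun loc => pvLookup values loc) locations 9999999999 []
  if st.2.length > 0 then
    match PySem.List.sorted2 st.2 (fun p => p.1) (fun p => p.2) with
    | x :: _ => some x          -- sorted(lowestLocs)[0], the guard ensures the list is nonempty
    | [] => none
  else none

-- ===== PORT B =====
def get_best_enemy_alt (locations : List (Int × Int)) (values : List (Int × Int × Int)) : Option (Int × Int) :=
  match locations with
  | [] => none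
  | _ :: _ =>
    match PySem.List.min? (locations.map (fun loc => pvLookup values loc)) (fun x => x) with
    | none => none              -- unreachable: locations is nonempty
    | some m => PySem.List.min2? (locations.filter (fun loc => pvLookup values loc = m)) (fun p => p.1) (fun p => p.2)

-- ===== PRECONDITION & SPEC =====
-- Pre_: every queried location is a key of the dict (otherwise Python's values[loc] raises KeyError).
def Pre_get_best_enemy (locations : List (Int × Int)) (values : List (Int × Int × Int)) : Prop :=
  ∀ loc ∈ locations, (values.any (fun e => e.1 = loc.1 && e.2.1 = loc.2)) = true
instance (locations : List (Int × Int)) (values : List (Int × Int × Int)) : Decidable (Pre_get_best_enemy locations values) := by unfold Pre_get_best_enemy; infer_instance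
def pvWitness_get_best_enemy : (List (Int × Int)) × (List (Int × Int × Int)) := ([(0, 0), (1, 2)], [(0, 0, 3), (1, 2, 3)])

def Spec_get_best_enemy (locations : List (Int × Int)) (values : List (Int × Int × Int)) (out : Option (Int × Int)) : Prop := out = get_best_enemy_alt locations values
instance (locations : List (Int × Int)) (values : List (Int × Int × Int)) (out : Option (Int × Int)) : Decidable (Spec_get_best_enemy locations values out) := by unfold Spec_get_best_enemy; infer_instance

-- ===== CLAIM (what is proved, stated in full; the proofs are below) =====
def Claim_equal_get_best_enemy : Prop := ∀ (locations : List (Int × Int)) (values : List (Int × Int × Int)), Dom_get_best_enemy locations values → Pre_get_best_enemy locations values → Spec_get_best_enemy locations values (get_best_enemy locations values)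

-- ===== LEMMAS AND PROOFS =====

-- lexicographic ≤ on pairs of integers (Python's tuple order)
def pvL (a b : Int × Int) : Prop := a.1 < b.1 ∨ (a.1 = b.1 ∧ a.2 ≤ b.2)

-- the strict comparison both min2? and sorted2 use, for keys (·.1), (·.2)
def pvLtB (a b : Int × Int) : Bool := decide (a.1 < b.1) || (!decide (b.1 < a.1) && decide (a.2 < b.2))

theorem pvLtB_iff (a b : Int × Int) : pvLtB a b = true ↔ ¬ pvL b a := by
  obtain ⟨a1, a2⟩ := a; obtain ⟨b1, b2⟩ := b
  simp [pvLtB, pvL]; omega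

theorem pvL_refl (a : Int × Int) : pvL a a := by simp [pvL]

theorem pvL_total (a b : Int × Int) : pvL a b ∨ pvL b a := by
  obtain ⟨a1, a2⟩ := a; obtain ⟨b1, b2⟩ := b; simp [pvL]; omega

theorem pvL_trans {a b c : Int × Int} (h1 : pvL a b) (h2 : pvL b c) : pvL a c := by
  obtain ⟨a1, a2⟩ := a; obtain ⟨b1, b2⟩ := b; obtain ⟨c1, c2⟩ := c
  simp [pvL] at *; omega

theorem pvL_antisymm {a b : Int × Int} (h1 : pvL a b) (h2 : pvL b a) : a = b := by
  obtain ⟨a1, a2⟩ := a; obtain ⟨b1, b2⟩ := b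
  simp [pvL] at *; omega

theorem pvL_of_not (a b : Int × Int) (h : ¬ pvL a b) : pvL b a := (pvL_total a b).resolve_left h

-- min2? returns a lex-minimal element
def pvStep (acc : Option (Int × Int)) (x : Int × Int) : Option (Int × Int) :=
  match acc with
  | none => some x
  | some m => if pvLtB x m then some x else some m

theorem min2_fold_spec (xs : List (Int × Int)) : ∀ m : Int × Int,
    ∃ z, xs.foldl pvStep (some m) = some z ∧
      (z = m ∨ z ∈ xs) ∧ pvL z m ∧ ∀ y ∈ xs, pvL z y := by
  induction xs with
  | nil => intro m; exact ⟨m, rfl, Or.inl rfl, pvL_refl m, by simp⟩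
  | cons x rest ih =>
    intro m
    rw [List.foldl_cons]
    by_cases h : pvLtB x m = true
    · obtain ⟨z, hz, hmem, hle, hall⟩ := ih x
      refine ⟨z, by rw [show pvStep (some m) x = some x from by simp [pvStep, h]]; exact hz, ?_, ?_, ?_⟩
      · rcases hmem with h' | h' <;> simp [h']
      · have hxm : pvL x m := pvL_of_not m x ((pvLtB_iff x m).mp h)
        exact pvL_trans hle hxm
      · intro y hy; rcases List.mem_cons.mp hy with h' | h'
        · exact h' ▸ hle
        · exact hall y h'
    · obtain ⟨z, hz, hmem, hle, hall⟩ := ih m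
      refine ⟨z, by rw [show pvStep (some m) x = some m from by simp [pvStep, h]]; exact hz, ?_, hle, ?_⟩
      · rcases hmem with h' | h' <;> simp [h']
      · intro y hy; rcases List.mem_cons.mp hy with h' | h'
        · have hmx : pvL m x := by
            by_contra hc
            exact h ((pvLtB_iff x m).mpr hc)
          exact h' ▸ pvL_trans hle hmx
        · exact hall y h'

theorem min2?_eq_foldl (x : Int × Int) (rest : List (Int × Int)) :
    PySem.List.min2? (x :: rest) (fun p => p.1) (fun p => p.2) = rest.foldl pvStep (some x) := by
  unfold PySem.List.min2?
  rw [List.foldl_cons]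
  show List.foldl _ (some x) rest = _
  induction rest generalizing x with
  | nil => rfl
  | cons y t ih =>
    rw [List.foldl_cons, List.foldl_cons]
    show List.foldl _ (if pvLtB y x then some y else some x) t
        = List.foldl pvStep (pvStep (some x) y) t
    rw [show pvStep (some x) y = if pvLtB y x then some y else some x from rfl]
    by_cases h : pvLtB y x <;> simp only [h] <;> [exact ih y; exact ih x]

theorem min2?_spec (x : Int × Int) (rest : List (Int × Int)) :
    ∃ z, PySem.List.min2? (x :: rest) (fun p => p.1) (fun p => p.2) = some z ∧
      z ∈ x :: rest ∧ ∀ y ∈ x :: rest, pvL z y := by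
  obtain ⟨z, hz, hmem, hle, hall⟩ := min2_fold_spec rest x
  refine ⟨z, (min2?_eq_foldl x rest) ▸ hz, ?_, ?_⟩
  · rcases hmem with h | h <;> simp [h]
  · intro y hy; rcases List.mem_cons.mp hy with h | h
    · exact h ▸ hle
    · exact hall y h

-- insertion sort (sorted2) keeps the list pairwise lex-ordered
theorem insertBy_pairwise (x : Int × Int) (ys : List (Int × Int))
    (h : ys.Pairwise pvL) : (PySem.List.insertBy pvLtB x ys).Pairwise pvL := by
  induction ys with
  | nil => simp [PySem.List.insertBy]
  | cons y ys ih =>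
    rw [List.pairwise_cons] at h
    obtain ⟨hy, hys⟩ := h
    by_cases hb : pvLtB x y = true
    · rw [PySem.List.insertBy, if_pos hb]
      have hxy : pvL x y := pvL_of_not y x ((pvLtB_iff x y).mp hb)
      refine List.pairwise_cons.mpr ⟨?_, List.pairwise_cons.mpr ⟨hy, hys⟩⟩
      intro z hz; rcases List.mem_cons.mp hz with h' | h'
      · exact h' ▸ hxy
      · exact pvL_trans hxy (hy z h')
    · rw [PySem.List.insertBy, if_neg hb]
      refine List.pairwise_cons.mpr ⟨?_, ih hys⟩
      intro z hz
      rcases (PySem.List.mem_insertBy pvLtB x z ys).mp hz with h' | h'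
      · have : ¬ ¬ pvL y x := (pvLtB_iff x y).not.mp (by simpa using hb)
        exact h' ▸ (not_not.mp this)
      · exact hy z h'

theorem foldl_insertBy_pairwise (xs : List (Int × Int)) : ∀ acc : List (Int × Int),
    acc.Pairwise pvL → (xs.foldl (fun acc x => PySem.List.insertBy pvLtB x acc) acc).Pairwise pvL := by
  induction xs with
  | nil => intro acc h; simpa using h
  | cons x rest ih => intro acc h; exact ih _ (insertBy_pairwise x acc h)

theorem sorted2_pairwise (xs : List (Int × Int)) :
    (PySem.List.sorted2 xs (fun p => p.1) (fun p => p.2)).Pairwise pvL := by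
  have : PySem.List.sorted2 xs (fun p => p.1) (fun p => p.2) =
      xs.foldl (fun acc x => PySem.List.insertBy pvLtB x acc) [] := rfl
  rw [this]
  exact foldl_insertBy_pairwise xs [] (by simp)

theorem sorted2_head_spec (xs : List (Int × Int)) (z : Int × Int) (t : List (Int × Int))
    (h : PySem.List.sorted2 xs (fun p => p.1) (fun p => p.2) = z :: t) :
    z ∈ xs ∧ ∀ y ∈ xs, pvL z y := by
  have hperm := PySem.List.sorted2_perm xs (fun p => p.1) (fun p => p.2) false
  rw [h] at hperm
  constructor
  · exact hperm.mem_iff.mp (by simp)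
  · intro y hy
    have hy' : y ∈ z :: t := hperm.mem_iff.mpr hy
    rcases List.mem_cons.mp hy' with h' | h'
    · exact h' ▸ pvL_refl z
    · have := sorted2_pairwise xs
      rw [h] at this
      exact (List.pairwise_cons.mp this).1 y h'

-- the running minimum of A's loop
theorem foldl_min_le (v : Int × Int → Int) (l : List (Int × Int)) : ∀ a : Int,
    l.foldl (fun a x => min a (v x)) a ≤ a := by
  induction l with
  | nil => intro a; simp
  | cons x rest ih =>
    intro a
    calc rest.foldl (fun a x => min a (v x)) (min a (v x)) ≤ min a (v x) := ih _
      _ ≤ a := min_le_left _ _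

theorem foldl_min_attained (v : Int × Int → Int) (l : List (Int × Int)) : ∀ a : Int,
    l.foldl (fun a x => min a (v x)) a = a ∨ ∃ x ∈ l, v x = l.foldl (fun a x => min a (v x)) a := by
  induction l with
  | nil => intro a; simp
  | cons x rest ih =>
    intro a
    rcases ih (min a (v x)) with h | ⟨y, hy, hvy⟩
    · by_cases hc : v x ≤ a
      · right; exact ⟨x, by simp, by simp [List.foldl, h]; omega⟩
      · left; simp [List.foldl, h]; omega
    · right; exact ⟨y, by simp [hy], by simpa using hvy⟩

-- closed characterisation of A's loop
theorem goA_char (v : Int × Int → Int) (l : List (Int × Int)) : ∀ (low : Int) (locs : List (Int × Int)),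
    goA v l low locs =
      (l.foldl (fun a x => min a (v x)) low,
       (if l.foldl (fun a x => min a (v x)) low < low then [] else locs) ++
         l.filter (fun x => v x = l.foldl (fun a x => min a (v x)) low)) := by
  induction l with
  | nil => intro low locs; simp [goA]
  | cons loc rest ih =>
    intro low locs
    set c := v loc with hc
    by_cases h1 : c < low
    · have hmin : min low c = c := by omega
      have hm : (loc :: rest).foldl (fun a x => min a (v x)) low
          = rest.foldl (fun a x => min a (v x)) c := by simp [List.foldl, ← hc, hmin]
      have hle := foldl_min_le v rest c
      rw [goA, if_pos (by rw [← hc]; exact h1)]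
      rw [ih c [loc], hm]
      have hlow : rest.foldl (fun a x => min a (v x)) c < low := lt_of_le_of_lt hle h1
      rw [if_pos hlow]
      by_cases h2 : rest.foldl (fun a x => min a (v x)) c < c
      · rw [if_pos h2]
        simp [List.filter_cons, ← hc]
        omega
      · have heq : c = rest.foldl (fun a x => min a (v x)) c := by omega
        rw [if_neg h2]
        simp [← hc, ← heq]
    · by_cases h2 : c = low
      · have hmin : min low c = low := by omega
        have hm : (loc :: rest).foldl (fun a x => min a (v x)) low
            = rest.foldl (fun a x => min a (v x)) low := by simp [List.foldl, ← hc, hmin]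
        rw [goA, if_neg (by rw [← hc]; exact h1), if_pos (by rw [← hc]; exact h2)]
        rw [ih low (locs ++ [loc]), hm]
        by_cases h3 : rest.foldl (fun a x => min a (v x)) low < low
        · rw [if_pos h3, if_pos h3]
          simp [List.filter_cons, ← hc]
          omega
        · have heq : rest.foldl (fun a x => min a (v x)) low = low := by
            have := foldl_min_le v rest low; omega
          rw [if_neg h3, if_neg h3]
          simp [← hc, heq, h2]
      · have h4 : low < c := by omega
        have hmin : min low c = low := by omega
        have hm : (loc :: rest).foldl (fun a x => min a (v x)) low
            = rest.foldl (fun a x => min a (v x)) low := by simp [List.foldl, ← hc, hmin]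
        rw [goA, if_neg (by rw [← hc]; exact h1), if_neg (by rw [← hc]; exact h2)]
        rw [ih low locs, hm]
        have hle := foldl_min_le v rest low
        simp [List.filter_cons, ← hc]
        omega

-- within Dom every dict value (and the default 0) is far below A's sentinel
theorem pvLookup_lt (values : List (Int × Int × Int))
    (h : (values.all (fun e => (pvDomInt e.1) && ((pvDomInt e.2.1) && (pvDomInt e.2.2)))) = true)
    (loc : Int × Int) : pvLookup values loc < 9999999999 := by
  induction values with
  | nil => simp [pvLookup]
  | cons e rest ih =>
    simp only [List.all_cons, Bool.and_eq_true] at h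
    obtain ⟨⟨_, _, hv⟩, hrest⟩ := h
    rw [pvLookup]
    split
    · simp [pvDomInt] at hv; omega
    · exact ih hrest

-- ===== VERDICT (by name: the statement is the Claim_ definition above) =====
theorem get_best_enemy_spec : Claim_equal_get_best_enemy := by
  intro locations values hdom hpre
  unfold Spec_get_best_enemy
  unfold Dom_get_best_enemy at hdom
  simp only [Bool.and_eq_true] at hdom
  have hvals := hdom.2
  set v : Int × Int → Int := fun loc => pvLookup values loc with hv
  have hvlt : ∀ loc, v loc < 9999999999 := fun loc => pvLookup_lt values hvals loc
  match locations with
  | [] => simp [get_best_enemy, get_best_enemy_alt, goA]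
  | l0 :: rest =>
    -- the common minimum value
    set m := rest.foldl (fun a x => min a (v x)) (v l0) with hm
    have hsent : (l0 :: rest).foldl (fun a x => min a (v x)) 9999999999 = m := by
      have : min 9999999999 (v l0) = v l0 := by have := hvlt l0; omega
      simp [List.foldl, this, hm]
    have hmlt : m < 9999999999 := lt_of_le_of_lt (foldl_min_le v rest (v l0)) (hvlt l0)
    -- A's state after the loop
    have hA := goA_char v (l0 :: rest) 9999999999 []
    rw [hsent, if_pos hmlt] at hA
    -- the achiever list is nonempty
    have hatt : ∃ x ∈ l0 :: rest, v x = m := by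
      rcases foldl_min_attained v (l0 :: rest) 9999999999 with h | h
      · rw [hsent] at h; omega
      · rw [hsent] at h; exact h
    set ach := (l0 :: rest).filter (fun x => v x = m) with hach
    have hne : ach ≠ [] := by
      obtain ⟨x, hx, hvx⟩ := hatt
      intro hnil
      have : x ∈ ach := List.mem_filter.mpr ⟨hx, by simp [hvx]⟩
      simp [hnil] at this
    -- B's minimum value is the same m
    have hBmin : PySem.List.min? ((l0 :: rest).map v) (fun x => x) = some m := by
      rw [List.map_cons, PySem.List.min?_id_cons, List.foldl_map]
    -- both sides reduce to a statement about ach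
    rw [get_best_enemy, get_best_enemy_alt]
    simp only [← hv, hBmin, hA]
    rw [if_pos (by simp [List.length_pos_iff, hne])]
    simp only [List.nil_append, ← hach]
    match hs : PySem.List.sorted2 ach (fun p => p.1) (fun p => p.2) with
    | [] =>
      have hp := PySem.List.sorted2_perm ach (fun p => p.1) (fun p => p.2) false
      rw [hs] at hp
      exact absurd hp.symm.eq_nil hne
    | z :: t =>
      obtain ⟨hzmem, hzmin⟩ := sorted2_head_spec ach z t hs
      obtain ⟨a0, arest, hach'⟩ := List.exists_cons_of_ne_nil hne
      obtain ⟨w, hw, hwmem, hwmin⟩ := min2?_spec a0 arest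
      show some z = _
      rw [hach', hw]
      have hwach : w ∈ ach := by rw [hach']; exact hwmem
      have hzach : z ∈ a0 :: arest := by rw [← hach']; exact hzmem
      have : z = w := pvL_antisymm (hzmin w hwach) (hwmin z hzach)
      rw [this]
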